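-- pv_equiv track=rewrite | github.com/thynaptic/oricli-alpha | mavaia_core/brain/modules/python_security_analysis.py | _generate_injection_recommendations
-- ===== SOURCE A (Python) =====
-- from typing import Any, Dict, List, Optional, Set, Tuple, Union
--
-- def _generate_injection_recommendations(risks: List[Dict[str, Any]]) -> List[str]:
--     """Generate injection risk recommendations."""
--     recommendations = []
--
--     if any(r.get("type") == "sql_injection" for r in risks):
--         recommendations.append("Use parameterized queries or ORM to prevent SQL injection")
--
--     if any(r.get("type") == "command_injection" for r in risks):
--         recommendations.append("Avoid executing user input as system commands")
--
--     if any(r.get("type") == "template_injection" for r in risks):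
--         recommendations.append("Sanitize all template variables")
--
--     return recommendations
-- ===== SOURCE B (Python) =====
-- # Single fold to a 3-bit mask, then one lookup in a precomputed table of all 8 outputs.
-- _BITS = [
--     (1, "Use parameterized queries or ORM to prevent SQL injection"),
--     (2, "Avoid executing user input as system commands"),
--     (4, "Sanitize all template variables"),
-- ]
--
-- _OUTPUTS = [[msg for bit, msg in _BITS if mask & bit] for mask in range(8)]
--
--
-- def _generate_injection_recommendations(risks):
--     """Generate injection risk recommendations."""
--     mask = 0
--     for r in risks:
--         t = r.get("type")
--         if t == "sql_injection":
--             mask |= 1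
--         elif t == "command_injection":
--             mask |= 2
--         elif t == "template_injection":
--             mask |= 4
--     return list(_OUTPUTS[mask])
-- ===== Notes on version B (the rewrite author's own statement) =====
-- stated objective: alternative
-- what changed: B folds the risks once into a 3-bit presence mask and returns the answer by indexing a precomputed table of all 8 possible recommendation lists, instead of A's three separate any-scans with conditional appends.
import Mathlib
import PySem

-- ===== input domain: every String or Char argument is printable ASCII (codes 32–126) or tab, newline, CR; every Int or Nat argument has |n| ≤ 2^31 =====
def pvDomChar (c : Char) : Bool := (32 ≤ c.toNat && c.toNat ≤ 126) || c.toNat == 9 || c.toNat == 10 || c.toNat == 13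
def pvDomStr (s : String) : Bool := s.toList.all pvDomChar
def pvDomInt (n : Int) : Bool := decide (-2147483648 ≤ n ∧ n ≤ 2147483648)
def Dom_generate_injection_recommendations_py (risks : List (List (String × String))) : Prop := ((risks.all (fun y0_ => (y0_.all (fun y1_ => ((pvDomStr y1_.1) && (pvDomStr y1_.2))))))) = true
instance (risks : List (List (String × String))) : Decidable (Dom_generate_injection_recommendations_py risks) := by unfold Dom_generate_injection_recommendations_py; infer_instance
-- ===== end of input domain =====

-- B folds the risks once into a 3-bit presence mask and looks the answer up in a precomputed table of all 8 outputs (objective: alternative).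

-- ===== PORT A =====
def generate_injection_recommendations_py (risks : List (List (String × String))) : List String :=
  let recommendations : List String := []
  let recommendations :=
    if risks.any (fun r => (PySem.Dict.mk r).get? "type" == some "sql_injection") then
      recommendations ++ ["Use parameterized queries or ORM to prevent SQL injection"]
    else recommendations
  let recommendations :=
    if risks.any (fun r => (PySem.Dict.mk r).get? "type" == some "command_injection") then
      recommendations ++ ["Avoid executing user input as system commands"]
    else recommendations
  let recommendations :=
    if risks.any (fun r => (PySem.Dict.mk r).get? "type" == some "template_injection") then
      recommendations ++ ["Sanitize all template variables"]
    else recommendations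
  recommendations

-- ===== PORT B =====
def injBits : List (Nat × String) :=
  [(1, "Use parameterized queries or ORM to prevent SQL injection"),
   (2, "Avoid executing user input as system commands"),
   (4, "Sanitize all template variables")]

-- _OUTPUTS = [[msg for bit, msg in _BITS if mask & bit] for mask in range(8)]
def injOutputs : List (List String) :=
  (List.range 8).map (fun mask => (injBits.filter (fun p => mask &&& p.1 != 0)).map Prod.snd)

def injStep (m : Nat) (r : List (String × String)) : Nat :=
  let t := (PySem.Dict.mk r).get? "type"
  if t == some "sql_injection" then m ||| 1
  else if t == some "command_injection" then m ||| 2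
  else if t == some "template_injection" then m ||| 4
  else m

def generate_injection_recommendations_py_alt (risks : List (List (String × String))) : List String :=
  let mask := risks.foldl injStep 0
  injOutputs.getD mask []

-- ===== PRECONDITION & SPEC =====
def Spec_generate_injection_recommendations_py (risks : List (List (String × String))) (out : List String) : Prop := out = generate_injection_recommendations_py_alt risks
instance (risks : List (List (String × String))) (out : List String) : Decidable (Spec_generate_injection_recommendations_py risks out) := by unfold Spec_generate_injection_recommendations_py; infer_instance

-- ===== CLAIM (what is proved, stated in full; the proofs are below) =====
def Claim_equal_generate_injection_recommendations_py : Prop := ∀ (risks : List (List (String × String))), Dom_generate_injection_recommendations_py risks → Spec_generate_injection_recommendations_py risks (generate_injection_recommendations_py risks)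

-- ===== LEMMAS AND PROOFS =====
-- the mask a list of risks contributes, expressed through A's three any-scans
def injEnc (risks : List (List (String × String))) : Nat :=
  (if risks.any (fun r => (PySem.Dict.mk r).get? "type" == some "sql_injection") then 1 else 0) |||
  (if risks.any (fun r => (PySem.Dict.mk r).get? "type" == some "command_injection") then 2 else 0) |||
  (if risks.any (fun r => (PySem.Dict.mk r).get? "type" == some "template_injection") then 4 else 0)

theorem injStep_or (m : Nat) (r : List (String × String)) :
    injStep m r = m ||| injStep 0 r := by
  unfold injStep
  dsimp only
  split_ifs <;> simp

theorem injEnc_cons (r : List (String × String)) (rest : List (List (String × String))) :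
    injEnc (r :: rest) = injStep 0 r ||| injEnc rest := by
  unfold injEnc injStep
  dsimp only
  simp only [List.any_cons]
  split_ifs <;> simp_all

theorem foldl_injStep (risks : List (List (String × String))) (m : Nat) :
    risks.foldl injStep m = m ||| injEnc risks := by
  induction risks generalizing m with
  | nil => simp [injEnc]
  | cons r rest ih =>
    rw [List.foldl_cons, ih, injStep_or, injEnc_cons, Nat.or_assoc]

-- ===== VERDICT (by name: the statement is the Claim_ definition above) =====
theorem generate_injection_recommendations_py_spec : Claim_equal_generate_injection_recommendations_py := by
  intro risks _
  unfold Spec_generate_injection_recommendations_py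
  unfold generate_injection_recommendations_py generate_injection_recommendations_py_alt
  simp only [foldl_injStep, Nat.zero_or, injEnc]
  cases h1 : risks.any (fun r => (PySem.Dict.mk r).get? "type" == some "sql_injection") <;>
  cases h2 : risks.any (fun r => (PySem.Dict.mk r).get? "type" == some "command_injection") <;>
  cases h3 : risks.any (fun r => (PySem.Dict.mk r).get? "type" == some "template_injection") <;>
    simp [injOutputs, injBits]
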